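-- pv_equiv track=rewrite | github.com/lightclient/random | serialized_multiproof/calculate_offsets.py | build_offsets
-- ===== SOURCE A (Python) =====
-- def build_offsets(nodes):
--     if len(nodes) == 0 or len(nodes[0]) == 0:
--         return []
--
--     left_subtree = []
--     right_subtree = []
--
--     for node in nodes:
--         if node.pop(0) == 0:
--             left_subtree.append(node)
--         else:
--             right_subtree.append(node)
--
--     left_subtree_size = [len(left_subtree)]
--     left_subtree_offsets = build_offsets(left_subtree)
--     right_subtree_offsets = build_offsets(right_subtree)
--
--     if len(left_subtree) == 0:
--         left_subtree_size = []
--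
--     return left_subtree_size + left_subtree_offsets + right_subtree_offsets
-- ===== SOURCE B (Python) =====
-- def build_offsets(nodes):
--     result = []
--     stack = [(nodes, 0)]
--     while stack:
--         group, d = stack.pop()
--         if not group or len(group[0]) <= d:
--             continue
--         left = [p for p in group if p[d] == 0]
--         right = [p for p in group if p[d] != 0]
--         if left:
--             result.append(len(left))
--         stack.append((right, d + 1))
--         stack.append((left, d + 1))
--     return result
-- ===== Notes on version B (the rewrite author's own statement) =====
-- stated objective: faster
-- what changed: Replaces A's recursion (mutating pop(0)-partition, recurse left then right, concatenate three lists) by a non-mutating iterative loop over an explicit stack of (group, depth) pairs that partitions by indexing p[d] with two comprehensions and appends each non-empty left-subtree size to a single result accumulator.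
import Mathlib
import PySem

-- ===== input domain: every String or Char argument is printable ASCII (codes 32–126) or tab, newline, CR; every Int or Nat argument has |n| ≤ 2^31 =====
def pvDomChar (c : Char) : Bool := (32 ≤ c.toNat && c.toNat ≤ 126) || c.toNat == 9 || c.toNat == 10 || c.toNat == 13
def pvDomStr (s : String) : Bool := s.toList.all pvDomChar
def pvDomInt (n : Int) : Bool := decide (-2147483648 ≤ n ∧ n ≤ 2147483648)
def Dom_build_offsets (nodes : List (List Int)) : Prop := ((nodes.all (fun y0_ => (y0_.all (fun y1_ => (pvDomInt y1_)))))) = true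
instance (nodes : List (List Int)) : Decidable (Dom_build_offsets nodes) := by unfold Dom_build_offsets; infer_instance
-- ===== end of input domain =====

-- B replaces A's recursion (mutating pop(0)-partition, recurse left/right, concatenate)
-- by a non-mutating iterative loop over an explicit stack of (group, depth) pairs that
-- partitions by indexing p[d] and appends sizes to one accumulator (objective: faster by a
-- constant factor, measured — B indexes p[d] instead of shifting elements with pop(0)).
-- A mutates the caller's inner lists in place (node.pop(0)); B does not: the equivalence
-- proved here is about the return value only.

-- ===== PORT A =====

-- sum of inner-list lengths, the termination measure of A's recursion
def pvSumLen (nodes : List (List Int)) : Nat := (nodes.map List.length).sum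

-- A's partition loop: 'for node in nodes: if node.pop(0)==0 …'.
-- On an empty node Python raises IndexError (excluded by Pre_); the port skips it there.
def popPartition (nodes : List (List Int)) : List (List Int) × List (List Int) :=
  nodes.foldl (fun lr node =>
    match node with
    | [] => lr
    | h :: t => if h = 0 then (lr.1 ++ [t], lr.2) else (lr.1, lr.2 ++ [t]))
    ([], [])

theorem popPartition_acc (ns : List (List Int)) : ∀ (L R : List (List Int)),
    ns.foldl (fun lr node =>
      match node with
      | [] => lr
      | h :: t => if h = 0 then (lr.1 ++ [t], lr.2) else (lr.1, lr.2 ++ [t])) (L, R)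
    = (L ++ (popPartition ns).1, R ++ (popPartition ns).2) := by
  induction ns with
  | nil => intro L R; simp [popPartition]
  | cons nd rest ih =>
    intro L R
    cases nd with
    | nil => simp only [popPartition, List.foldl_cons]; rw [ih, ih]; simp
    | cons h t =>
      by_cases h0 : h = 0 <;>
        (simp only [popPartition, List.foldl_cons, h0, if_true, if_false, ite_true, ite_false] <;>
         rw [ih, ih] <;> simp)

theorem popPartition_nil_cons (rest : List (List Int)) :
    popPartition (([] : List Int) :: rest) = popPartition rest := by
  simp only [popPartition, List.foldl_cons]

theorem popPartition_cons (h : Int) (t : List Int) (rest : List (List Int)) :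
    popPartition ((h :: t) :: rest) =
      if h = 0 then (t :: (popPartition rest).1, (popPartition rest).2)
      else ((popPartition rest).1, t :: (popPartition rest).2) := by
  by_cases h0 : h = 0 <;>
    simp only [popPartition, List.foldl_cons, h0, if_true, if_false, ite_true, ite_false] <;>
    rw [popPartition_acc] <;> simp [popPartition]

theorem popPartition_bounds (ns : List (List Int)) :
    pvSumLen (popPartition ns).1 + pvSumLen (popPartition ns).2 ≤ pvSumLen ns ∧
      (popPartition ns).1.length + (popPartition ns).2.length ≤ ns.length := by
  induction ns with
  | nil => simp [popPartition, pvSumLen]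
  | cons nd rest ih =>
    cases nd with
    | nil =>
      rw [popPartition_nil_cons]
      simp only [pvSumLen, List.map_cons, List.sum_cons, List.length_cons] at *
      omega
    | cons h t =>
      rw [popPartition_cons]
      by_cases h0 : h = 0 <;>
        simp only [h0, ite_true, ite_false, if_true, if_false, pvSumLen, List.map_cons,
          List.sum_cons, List.length_cons] at * <;> omega

theorem popPartition_sumLen_lt (first : List Int) (rest : List (List Int)) (h : first ≠ []) :
    pvSumLen (popPartition (first :: rest)).1 + pvSumLen (popPartition (first :: rest)).2 <
      pvSumLen (first :: rest) := by
  obtain ⟨hh, t, rfl⟩ : ∃ hh t, first = hh :: t := by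
    cases first with
    | nil => exact absurd rfl h
    | cons a b => exact ⟨a, b, rfl⟩
  have hb := (popPartition_bounds rest).1
  rw [popPartition_cons]
  by_cases h0 : hh = 0 <;>
    simp only [h0, ite_true, ite_false, pvSumLen, List.map_cons, List.sum_cons,
      List.length_cons] at * <;> omega

def build_offsets (nodes : List (List Int)) : List Int :=
  match nodes with
  | [] => []
  | first :: rest =>
    if hf : first = [] then []
    else
      let l := (popPartition (first :: rest)).1
      let r := (popPartition (first :: rest)).2
      let left_subtree_size : List Int := [(l.length : Int)]
      let lo := build_offsets l
      let ro := build_offsets r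
      (if l.length = 0 then ([] : List Int) else left_subtree_size) ++ lo ++ ro
termination_by pvSumLen nodes
decreasing_by
  · have := popPartition_sumLen_lt first rest hf; omega
  · have := popPartition_sumLen_lt first rest hf; omega

-- ===== PORT B =====

-- B's comprehension tests 'p[d] == 0' / 'p[d] != 0'; on d out of range Python raises
-- IndexError (such inputs are outside Pre_), so the port puts such a node in neither part.
def pvGoesLeft (p : List Int) (d : Nat) : Bool := decide (d < p.length) && decide (p.getD d 0 = 0)
def pvGoesRight (p : List Int) (d : Nat) : Bool := decide (d < p.length) && !decide (p.getD d 0 = 0)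

-- termination measure of B's loop: weight of one (group, depth) entry, and of the stack
def pvSumDrop (g : List (List Int)) (d : Nat) : Nat := (g.map (fun p => p.length - d)).sum
def pvM (g : List (List Int)) (d : Nat) : Nat := 2 * pvSumDrop g d + g.length
def pvStk (stack : List (List (List Int) × Nat)) : Nat :=
  (stack.map (fun e => pvM e.1 e.2 + 1)).sum

theorem pvChildren_bound (d : Nat) : ∀ (g : List (List Int)),
    pvM (g.filter (fun p => pvGoesLeft p d)) (d + 1)
      + pvM (g.filter (fun p => pvGoesRight p d)) (d + 1)
      + (g.filter (fun p => pvGoesLeft p d || pvGoesRight p d)).length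
      ≤ 2 * pvSumDrop g d := by
  intro g
  induction g with
  | nil => simp [pvM, pvSumDrop]
  | cons p t ih =>
    by_cases hl : d < p.length
    · by_cases h0 : p.getD d 0 = 0 <;>
        (simp only [List.filter_cons, pvGoesLeft, pvGoesRight, hl, h0, decide_true,
          decide_false, Bool.true_and, Bool.not_true, Bool.not_false, Bool.and_true,
          Bool.and_false, Bool.true_or, Bool.or_true, Bool.or_false, Bool.false_or,
          Bool.false_eq_true, if_true, if_false, ite_true, ite_false, pvM, pvSumDrop,
          List.map_cons, List.sum_cons, List.length_cons] at ih ⊢ ; omega)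
    · simp only [List.filter_cons, pvGoesLeft, pvGoesRight, hl, decide_false,
        Bool.false_and, Bool.false_or, Bool.false_eq_true, if_false, ite_false,
        pvM, pvSumDrop, List.map_cons, List.sum_cons, List.length_cons] at ih ⊢
      omega

theorem pvEntry_lt (g : List (List Int)) (d : Nat) (first : List Int) (rest : List (List Int))
    (hg : g = first :: rest) (hf : ¬ first.length ≤ d) :
    (pvM (g.filter (fun p => pvGoesLeft p d)) (d + 1) + 1)
      + (pvM (g.filter (fun p => pvGoesRight p d)) (d + 1) + 1) < pvM g d + 1 := by
  have hb := pvChildren_bound d g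
  have hfirst : (pvGoesLeft first d || pvGoesRight first d) = true := by
    simp only [pvGoesLeft, pvGoesRight]
    by_cases h0 : first.getD d 0 = 0 <;> simp [hf, h0, Nat.lt_of_not_le (by omega)] <;> omega
  have hcnt : 1 ≤ (g.filter (fun p => pvGoesLeft p d || pvGoesRight p d)).length := by
    subst hg
    simp only [List.filter_cons, hfirst, ite_true, List.length_cons]
    omega
  have hlen : 1 ≤ g.length := by subst hg; simp
  simp only [pvM] at *
  omega

-- the while-loop of B: stack of (group, depth) pairs (head = top), result accumulator
def bLoop : List (List (List Int) × Nat) → List Int → List Int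
  | [], result => result
  | ([], _) :: stk, result => bLoop stk result
  | (first :: rest, d) :: stk, result =>
    if first.length ≤ d then bLoop stk result
    else
      let l := (first :: rest).filter (fun p => pvGoesLeft p d)
      let r := (first :: rest).filter (fun p => pvGoesRight p d)
      bLoop ((l, d + 1) :: (r, d + 1) :: stk)
        (if l = [] then result else result ++ [(l.length : Int)])
termination_by stack _ => pvStk stack
decreasing_by
  · simp only [pvStk, List.map_cons, List.sum_cons, pvM]; omega
  · simp only [pvStk, List.map_cons, List.sum_cons, pvM]; omega
  · have := pvEntry_lt (first :: rest) d first rest rfl (by assumption)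
    simp only [pvStk, List.map_cons, List.sum_cons]; omega

def build_offsets_alt (nodes : List (List Int)) : List Int := bLoop [(nodes, 0)] []

-- ===== PRECONDITION & SPEC =====

-- the bit a node's entry selects: 0 goes left (false), anything else right (true)
def pvBitPath (p : List Int) : List Bool := p.map (fun x => decide (¬ x = 0))

-- Pre_ excludes exactly the inputs on which Python A raises IndexError (node.pop(0) on an
-- exhausted node): a node is safe iff at some ancestor-or-self position t along its bit-path
-- the first node whose bit-path extends t sits exactly at t (so recursion returns before
-- popping the exhausted node).
def Pre_build_offsets (nodes : List (List Int)) : Prop :=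
  ∀ p ∈ nodes, ∃ k ∈ List.range ((pvBitPath p).length + 1),
    (nodes.find? (fun n => decide ((pvBitPath p).take k <+: pvBitPath n))).any
      (fun n => pvBitPath n == (pvBitPath p).take k) = true

instance (nodes : List (List Int)) : Decidable (Pre_build_offsets nodes) := by
  unfold Pre_build_offsets; infer_instance

def pvWitness_build_offsets : List (List Int) := [[0, 0], [0, 1], [1]]

def Spec_build_offsets (nodes : List (List Int)) (out : List Int) : Prop := out = build_offsets_alt nodes
instance (nodes : List (List Int)) (out : List Int) : Decidable (Spec_build_offsets nodes out) := by unfold Spec_build_offsets; infer_instance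

-- ===== CLAIM (what is proved, stated in full; the proofs are below) =====
def Claim_equal_build_offsets : Prop := ∀ (nodes : List (List Int)), Dom_build_offsets nodes → Pre_build_offsets nodes → Spec_build_offsets nodes (build_offsets nodes)

-- ===== LEMMAS AND PROOFS =====

-- recursive description of what one stack entry contributes (proof helper, not a port)
def bRec : List (List Int) → Nat → List Int
  | [], _ => []
  | first :: rest, d =>
    if first.length ≤ d then []
    else
      let l := (first :: rest).filter (fun p => pvGoesLeft p d)
      let r := (first :: rest).filter (fun p => pvGoesRight p d)
      (if l = [] then [] else [(l.length : Int)]) ++ bRec l (d + 1) ++ bRec r (d + 1)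
termination_by g d => pvM g d
decreasing_by
  · have := pvEntry_lt (first :: rest) d first rest rfl (by assumption); omega
  · have := pvEntry_lt (first :: rest) d first rest rfl (by assumption); omega

theorem bLoop_append (n : Nat) :
    ∀ (g : List (List Int)) (d : Nat) (stk : List (List (List Int) × Nat)) (res : List Int),
      pvM g d + 1 + pvStk stk ≤ n →
      bLoop ((g, d) :: stk) res = bLoop stk (res ++ bRec g d) := by
  induction n with
  | zero => intro g d stk res hle; exfalso; simp only [pvM] at hle; omega
  | succ n ih =>
    intro g d stk res hle
    cases g with
    | nil => simp [bLoop, bRec]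
    | cons first rest =>
      by_cases hf : first.length ≤ d
      · simp [bLoop, bRec, hf]
      · have hm := pvEntry_lt (first :: rest) d first rest rfl hf
        rw [bLoop, bRec]
        simp only [hf, dif_neg, not_false_iff, if_neg]
        rw [ih _ _ _ _ (by simp only [pvStk, List.map_cons, List.sum_cons] at *; omega)]
        rw [ih _ _ _ _ (by simp only [pvStk, List.map_cons, List.sum_cons] at *; omega)]
        by_cases hl : (first :: rest).filter (fun p => pvGoesLeft p d) = []
        · simp [hl]
        · simp [hl]

theorem popPartition_map_drop : ∀ (g : List (List Int)) (d : Nat),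
    popPartition (g.map (fun p => p.drop d)) =
      ((g.filter (fun p => pvGoesLeft p d)).map (fun p => p.drop (d + 1)),
       (g.filter (fun p => pvGoesRight p d)).map (fun p => p.drop (d + 1))) := by
  intro g d
  induction g with
  | nil => simp [popPartition]
  | cons p t ih =>
    by_cases hl : d < p.length
    · have hdrop : p.drop d = p[d] :: p.drop (d + 1) := List.drop_eq_getElem_cons hl
      have hgetD : p.getD d 0 = p[d] := List.getD_eq_getElem p 0 hl
      rw [List.map_cons, hdrop, popPartition_cons, ih]
      by_cases h0 : p[d] = 0 <;>
        simp [List.filter_cons, pvGoesLeft, pvGoesRight, hl, hgetD, h0]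
    · have hdrop : p.drop d = [] := List.drop_eq_nil_iff.mpr (by omega)
      rw [List.map_cons, hdrop, popPartition_nil_cons, ih]
      simp [List.filter_cons, pvGoesLeft, pvGoesRight, hl]

theorem bRec_eq (n : Nat) : ∀ (g : List (List Int)) (d : Nat),
    pvM g d ≤ n → bRec g d = build_offsets (g.map (fun p => p.drop d)) := by
  induction n with
  | zero =>
    intro g d hle
    cases g with
    | nil => simp [bRec, build_offsets]
    | cons first rest => exfalso; simp only [pvM, List.length_cons] at hle; omega
  | succ n ih =>
    intro g d hle
    cases g with
    | nil => simp [bRec, build_offsets]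
    | cons first rest =>
      by_cases hf : first.length ≤ d
      · have hdrop : first.drop d = [] := List.drop_eq_nil_iff.mpr (by omega)
        rw [bRec, List.map_cons, build_offsets]
        simp [hf, hdrop]
      · have hdrop : first.drop d ≠ [] := by
          simp only [ne_eq, List.drop_eq_nil_iff]; omega
        have hm := pvEntry_lt (first :: rest) d first rest rfl hf
        rw [bRec, List.map_cons, build_offsets]
        simp only [hf, if_neg, dif_neg, hdrop, not_false_iff, List.map_cons] at *
        have hpp := popPartition_map_drop (first :: rest) d
        simp only [List.map_cons] at hpp
        rw [hpp]
        rw [← ih _ _ (by omega), ← ih _ _ (by omega)]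
        by_cases hlnil : (first :: rest).filter (fun p => pvGoesLeft p d) = [] <;>
          simp [hlnil]

theorem alt_eq (nodes : List (List Int)) : build_offsets_alt nodes = build_offsets nodes := by
  show bLoop [(nodes, 0)] [] = _
  rw [bLoop_append (pvM nodes 0 + 1 + pvStk []) nodes 0 [] [] (le_refl _)]
  rw [bLoop, List.nil_append, bRec_eq (pvM nodes 0) nodes 0 (le_refl _)]
  simp

-- ===== VERDICT (by name: the statement is the Claim_ definition above) =====
theorem build_offsets_spec : Claim_equal_build_offsets := by
  intro nodes _ _
  unfold Spec_build_offsets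
  exact (alt_eq nodes).symm
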